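-- pv_equiv track=rewrite | github.com/AIWASS23/constellation | test_models.py | calculate_colision_matrix
-- ===== SOURCE A (Python) =====
-- def calculate_colision_matrix(matrix, kernel, baseRow, baseCol):
--     colision_matrix = []
--     kernel_center_row = len(kernel) // 2
--     kernel_center_col = len(kernel[0]) // 2
--
--     for m in range(len(kernel)):
--         for n in range(len(kernel[0])):
--             row = baseRow + (m - kernel_center_row)
--             col = baseCol + (n - kernel_center_col)
--
--             if 0 <= row < len(matrix) and 0 <= col < len(matrix[0]):
--                 colision_matrix.append(matrix[row][col])
--
--     return colision_matrix
-- ===== SOURCE B (Python) =====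
-- def calculate_colision_matrix(matrix, kernel, baseRow, baseCol):
--     kernel_rows = len(kernel)
--     kernel_cols = len(kernel[0])
--     row_start = baseRow - kernel_rows // 2
--     col_start = baseCol - kernel_cols // 2
--     values = []
--     for line in matrix[max(0, row_start):max(0, row_start + kernel_rows)]:
--         values.extend(line[max(0, col_start):max(0, col_start + kernel_cols)])
--     return values
-- ===== Notes on version B (the rewrite author's own statement) =====
-- stated objective: simpler
-- what changed: B computes the clamped overlapping window up front and collects it with list slices (one row slice of the matrix, one column slice per row) instead of A's nested index loops over the whole kernel with a per-cell bounds test.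
-- outside the precondition, e.g. on calculate_colision_matrix([], [], 0, 0): A raises IndexError, B raises IndexError; on calculate_colision_matrix([[1, 2], [3]], [[1]], 1, 1): A raises IndexError, B returns []; on calculate_colision_matrix([[1, 2], [3, 4, 5]], [[0]], 1, 2): A returns [], B returns [5]
import Mathlib
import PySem

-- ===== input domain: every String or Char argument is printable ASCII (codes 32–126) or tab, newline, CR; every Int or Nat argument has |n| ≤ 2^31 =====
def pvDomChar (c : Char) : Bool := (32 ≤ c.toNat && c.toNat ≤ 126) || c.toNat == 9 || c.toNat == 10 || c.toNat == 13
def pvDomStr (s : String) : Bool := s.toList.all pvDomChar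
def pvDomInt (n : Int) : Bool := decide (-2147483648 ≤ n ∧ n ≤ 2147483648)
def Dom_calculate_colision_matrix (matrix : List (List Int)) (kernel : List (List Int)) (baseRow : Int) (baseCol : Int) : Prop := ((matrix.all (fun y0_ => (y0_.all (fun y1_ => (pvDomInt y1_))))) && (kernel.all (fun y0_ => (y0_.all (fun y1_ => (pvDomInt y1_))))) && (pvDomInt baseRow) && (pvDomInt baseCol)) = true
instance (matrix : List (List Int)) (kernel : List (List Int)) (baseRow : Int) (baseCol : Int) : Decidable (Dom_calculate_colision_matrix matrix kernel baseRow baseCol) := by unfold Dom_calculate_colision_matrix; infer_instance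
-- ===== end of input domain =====

-- B replaces A's nested kernel-index loops with a per-cell bounds test by a clamped
-- window collected through list slices (objective: simpler; a timing run also measured it faster).

-- ===== PORT A =====
def calculate_colision_matrix (matrix : List (List Int)) (kernel : List (List Int)) (baseRow : Int) (baseCol : Int) : List Int :=
  let kernel_center_row := PySem.Int.floordiv (PySem.List.len kernel) 2
  let kernel_center_col := PySem.Int.floordiv (PySem.List.len (PySem.List.pyGetD kernel 0 [])) 2
  (PySem.List.pyRange 0 (PySem.List.len kernel) 1).foldl (fun acc m =>
    (PySem.List.pyRange 0 (PySem.List.len (PySem.List.pyGetD kernel 0 [])) 1).foldl (fun acc2 n =>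
      let row := baseRow + (m - kernel_center_row)
      let col := baseCol + (n - kernel_center_col)
      if 0 ≤ row ∧ row < PySem.List.len matrix ∧ 0 ≤ col ∧ col < PySem.List.len (PySem.List.pyGetD matrix 0 []) then
        acc2 ++ [PySem.List.pyGetD (PySem.List.pyGetD matrix row []) col 0]
      else acc2) acc) []

-- ===== PORT B =====
def calculate_colision_matrix_alt (matrix : List (List Int)) (kernel : List (List Int)) (baseRow : Int) (baseCol : Int) : List Int :=
  let kernel_rows := PySem.List.len kernel
  let kernel_cols := PySem.List.len (PySem.List.pyGetD kernel 0 [])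
  let row_start := baseRow - PySem.Int.floordiv kernel_rows 2
  let col_start := baseCol - PySem.Int.floordiv kernel_cols 2
  (PySem.List.slice matrix (some (max 0 row_start)) (some (max 0 (row_start + kernel_rows)))).foldl
    (fun values line =>
      values ++ PySem.List.slice line (some (max 0 col_start)) (some (max 0 (col_start + kernel_cols)))) []

-- ===== PRECONDITION & SPEC =====
-- Pre_ excludes an empty kernel (A raises IndexError on kernel[0]) and matrices in which
-- a row overlapped by the kernel window does not support the same column window as row 0
-- (A indexes every row with len(matrix[0]): there it raises IndexError on a shorter row or,
-- on a longer row, accidentally clips it to row 0's width).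
def Pre_calculate_colision_matrix (matrix : List (List Int)) (kernel : List (List Int)) (baseRow : Int) (baseCol : Int) : Prop :=
  kernel ≠ [] ∧
  ∀ pr ∈ matrix.zipIdx,
    (baseRow - PySem.Int.floordiv (PySem.List.len kernel) 2 ≤ (pr.2 : Int) ∧
     (pr.2 : Int) < baseRow - PySem.Int.floordiv (PySem.List.len kernel) 2 + PySem.List.len kernel) →
    min (baseCol - PySem.Int.floordiv (PySem.List.len (kernel.headD [])) 2 + PySem.List.len (kernel.headD []))
        ((matrix.headD []).length : Int)
      = min (baseCol - PySem.Int.floordiv (PySem.List.len (kernel.headD [])) 2 + PySem.List.len (kernel.headD []))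
        ((pr.1.length : Int))
instance (matrix : List (List Int)) (kernel : List (List Int)) (baseRow : Int) (baseCol : Int) : Decidable (Pre_calculate_colision_matrix matrix kernel baseRow baseCol) := by unfold Pre_calculate_colision_matrix; infer_instance
def pvWitness_calculate_colision_matrix : List (List Int) × List (List Int) × Int × Int := ([[1,2],[3,4]], [[5]], 0, 1)

def Spec_calculate_colision_matrix (matrix : List (List Int)) (kernel : List (List Int)) (baseRow : Int) (baseCol : Int) (out : List Int) : Prop := out = calculate_colision_matrix_alt matrix kernel baseRow baseCol
instance (matrix : List (List Int)) (kernel : List (List Int)) (baseRow : Int) (baseCol : Int) (out : List Int) : Decidable (Spec_calculate_colision_matrix matrix kernel baseRow baseCol out) := by unfold Spec_calculate_colision_matrix; infer_instance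

-- ===== CLAIM (what is proved, stated in full; the proofs are below) =====
def Claim_equal_calculate_colision_matrix : Prop := ∀ (matrix : List (List Int)) (kernel : List (List Int)) (baseRow : Int) (baseCol : Int), Dom_calculate_colision_matrix matrix kernel baseRow baseCol → Pre_calculate_colision_matrix matrix kernel baseRow baseCol → Spec_calculate_colision_matrix matrix kernel baseRow baseCol (calculate_colision_matrix matrix kernel baseRow baseCol)

-- ===== LEMMAS AND PROOFS =====

-- a foldl that conditionally appends one element is a flatMap of singletons/nils
theorem pvFoldlIfAppend {α β : Type} (l : List α) (acc : List β) (P : α → Prop) [DecidablePred P] (f : α → β) :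
    l.foldl (fun a n => if P n then a ++ [f n] else a) acc
      = acc ++ l.flatMap (fun n => if P n then [f n] else []) := by
  have hfun : (fun (a : List β) n => if P n then a ++ [f n] else a)
      = fun a n => a ++ (if P n then [f n] else []) := by
    funext a n; split <;> simp
  rw [hfun, PySem.List.foldl_append_eq_flatMap]

-- flatMap over range(0,k) of a window test '0 ≤ d+m < hi' is a flatMap over the clamped window
theorem pvClampFlat {α : Type} (g : Int → List α) (d hi : Int) :
    ∀ (k : Nat), (PySem.List.pyRange 0 (k : Int) 1).flatMap
        (fun m => if 0 ≤ d + m ∧ d + m < hi then g (d + m) else [])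
      = (PySem.List.pyRange (max 0 d) (min (d + k) hi) 1).flatMap g := by
  intro k
  induction k with
  | zero =>
    rw [PySem.List.pyRange_one_eq_nil (by omega), PySem.List.pyRange_one_eq_nil (by omega)]
    simp
  | succ k ih =>
    have hcast : ((k + 1 : Nat) : Int) = (k : Int) + 1 := by push_cast; ring
    rw [hcast, PySem.List.pyRange_one_succ_right (by omega), List.flatMap_append, ih]
    by_cases h : 0 ≤ d + k ∧ d + k < hi
    · have h1 : min (d + k) hi = d + k := by omega
      have h2 : min (d + ((k : Int) + 1)) hi = (d + (k : Int)) + 1 := by omega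
      rw [h1, h2, PySem.List.pyRange_one_succ_right (by omega), List.flatMap_append]
      simp [h]
    · have h2 : (PySem.List.pyRange (max 0 d) (min (d + ((k : Int) + 1)) hi) 1)
          = PySem.List.pyRange (max 0 d) (min (d + (k : Int)) hi) 1 := by
        by_cases hn : 0 ≤ d + k
        · have : min (d + ((k : Int) + 1)) hi = min (d + (k : Int)) hi := by omega
          rw [this]
        · rw [PySem.List.pyRange_one_eq_nil (by omega), PySem.List.pyRange_one_eq_nil (by omega)]
      push_cast at h2 ⊢
      rw [h2]
      simp [h]

-- a nonnegative-bounds slice is the map of pyGetD over the clamped index range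
theorem pvSliceAsMap {α : Type} (xs : List α) (dflt : α) (a b : Int) (ha : 0 ≤ a) (hb : 0 ≤ b) :
    PySem.List.slice xs (some a) (some b)
      = (PySem.List.pyRange a (min b (xs.length : Int)) 1).map (fun i => PySem.List.pyGetD xs i dflt) := by
  rw [PySem.List.slice_toNat xs ha hb]
  apply List.ext_getElem
  · simp [PySem.List.length_pyRange_one]
    omega
  · intro i h1 h2
    simp only [List.getElem_take, List.getElem_drop, List.getElem_map,
      PySem.List.getElem_pyRange_one]
    have hi : 0 ≤ a + (i : Int) ∧ a + (i : Int) < (xs.length : Int) := by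
      simp [PySem.List.length_pyRange_one] at h2
      omega
    rw [PySem.List.pyGetD_eq_getElem xs dflt hi.1 hi.2]
    congr 1
    omega

-- two ranges from the same start agree when the upper bounds agree or both are vacuous
theorem pvRangeBound (a b b' : Int) (h : (b ≤ a ∧ b' ≤ a) ∨ b = b') :
    PySem.List.pyRange a b 1 = PySem.List.pyRange a b' 1 := by
  rcases h with ⟨h1, h2⟩ | rfl
  · rw [PySem.List.pyRange_one_eq_nil h1, PySem.List.pyRange_one_eq_nil h2]
  · rfl

-- ===== VERDICT (by name: the statement is the Claim_ definition above) =====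
theorem calculate_colision_matrix_spec : Claim_equal_calculate_colision_matrix := by
  intro matrix kernel baseRow baseCol _ hpre
  obtain ⟨hk, hrect⟩ := hpre
  obtain ⟨k0, ktl, rfl⟩ := List.exists_cons_of_ne_nil hk
  unfold Spec_calculate_colision_matrix
  set cr := PySem.Int.floordiv (PySem.List.len (k0 :: ktl)) 2 with hcr
  set cc := PySem.Int.floordiv (PySem.List.len k0) 2 with hcc
  set H : Int := (matrix.length : Int) with hH
  set W : Int := ((matrix.headD []).length : Int) with hW
  set d := baseRow - cr with hd
  set e := baseCol - cc with he
  have hker0 : PySem.List.pyGetD (k0 :: ktl) 0 ([] : List Int) = k0 :=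
    PySem.List.pyGetD_zero_cons k0 ktl []
  set G : Int → List Int := fun r =>
    (PySem.List.pyRange 0 ((k0.length : Nat) : Int) 1).flatMap
      (fun n => if 0 ≤ e + n ∧ e + n < W then
        [PySem.List.pyGetD (PySem.List.pyGetD matrix r []) (e + n) 0] else []) with hG
  have harg1 : ∀ m : Int, baseRow + (m - cr) = d + m := by intro m; rw [hd]; ring
  have harg2 : ∀ n : Int, baseCol + (n - cc) = e + n := by intro n; rw [he]; ring
  have hWeq : PySem.List.len (PySem.List.pyGetD matrix 0 []) = W := by
    rw [hW]
    cases matrix with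
    | nil => simp [PySem.List.pyGetD_zero, PySem.List.len_eq]
    | cons r rs => simp [PySem.List.pyGetD_zero_cons, PySem.List.len_eq]
  have hlen : PySem.List.len (k0 :: ktl) = ((ktl.length + 1 : Nat) : Int) := by
    simp [PySem.List.len_eq]
  have hlenk : PySem.List.len k0 = ((k0.length : Nat) : Int) := by simp [PySem.List.len_eq]
  simp only [hlen, hlenk, List.headD_cons] at hrect
  -- A reduced to a flatMap over the clamped window
  have hA : calculate_colision_matrix matrix (k0 :: ktl) baseRow baseCol
      = (PySem.List.pyRange (max 0 d) (min (d + ((ktl.length + 1 : Nat) : Int)) H) 1).flatMap G := by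
    simp only [calculate_colision_matrix, hker0, ← hcr, ← hcc]
    have hbody : (fun (acc : List Int) (m : Int) =>
        (PySem.List.pyRange 0 (PySem.List.len k0) 1).foldl
          (fun acc2 n =>
            if 0 ≤ baseRow + (m - cr) ∧ baseRow + (m - cr) < PySem.List.len matrix ∧
               0 ≤ baseCol + (n - cc) ∧ baseCol + (n - cc) < PySem.List.len (PySem.List.pyGetD matrix 0 []) then
              acc2 ++ [PySem.List.pyGetD (PySem.List.pyGetD matrix (baseRow + (m - cr)) [])
                (baseCol + (n - cc)) 0]
            else acc2) acc)
        = fun acc m => acc ++ (if 0 ≤ d + m ∧ d + m < H then G (d + m) else []) := by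
      funext acc m
      rw [pvFoldlIfAppend]
      congr 1
      by_cases hrow : 0 ≤ d + m ∧ d + m < H
      · simp only [harg1, harg2, PySem.List.len_eq, hrow.1, true_and, hH, hG]
        simp only [PySem.List.len_eq] at hWeq
        rw [hWeq]
        have h2 : d + m < (matrix.length : Int) := hrow.2
        simp [h2]
      · simp only [harg1, harg2, PySem.List.len_eq, hH] at *
        have hnone : ∀ n : Int, ¬ (0 ≤ d + m ∧ d + m < (matrix.length : Int) ∧
            0 ≤ e + n ∧ e + n < ((PySem.List.pyGetD matrix 0 []).length : Int)) := by
          intro n hc; exact hrow ⟨hc.1, hc.2.1⟩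
        simp [hnone, hrow]
    rw [hbody, PySem.List.foldl_append_eq_flatMap, List.nil_append]
    rw [hlen, pvClampFlat G d H (ktl.length + 1)]
  -- B reduced to the same flatMap
  have hB : calculate_colision_matrix_alt matrix (k0 :: ktl) baseRow baseCol
      = (PySem.List.pyRange (max 0 d) (min (d + ((ktl.length + 1 : Nat) : Int)) H) 1).flatMap G := by
    simp only [calculate_colision_matrix_alt, hker0, ← hcr, ← hcc, ← hd, ← he]
    rw [PySem.List.foldl_append_eq_flatMap, List.nil_append]
    rw [pvSliceAsMap matrix [] (max 0 d)
      (max 0 (d + PySem.List.len (k0 :: ktl))) (le_max_left _ _) (le_max_left _ _)]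
    rw [List.flatMap_map, hlen]
    have hrng : PySem.List.pyRange (max 0 d)
        (min (max 0 (d + ((ktl.length + 1 : Nat) : Int))) (matrix.length : Int)) 1
        = PySem.List.pyRange (max 0 d) (min (d + ((ktl.length + 1 : Nat) : Int)) H) 1 := by
      rw [hH]
      apply pvRangeBound
      omega
    rw [hrng]
    apply List.flatMap_congr
    intro r hr
    rw [PySem.List.mem_pyRange_one] at hr
    have hr0 : 0 ≤ r := le_trans (le_max_left 0 d) hr.1
    have hrH : r < H := lt_of_lt_of_le hr.2 (min_le_right _ _)
    set line := PySem.List.pyGetD matrix r ([] : List Int) with hline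
    have hidx : r.toNat < matrix.length := by omega
    have hline_eq : line = matrix[r.toNat] := by
      rw [hline, PySem.List.pyGetD_eq_getElem matrix [] hr0 (by rw [← hH]; exact hrH)]
    have hminW : min (e + ((k0.length : Nat) : Int)) W
        = min (e + ((k0.length : Nat) : Int)) ((line.length : Int)) := by
      have hmem : (matrix[r.toNat], r.toNat) ∈ matrix.zipIdx := by
        rw [List.mem_zipIdx_iff_getElem?]
        simp [hidx]
      have := hrect _ hmem (by constructor <;> · simp only []; omega)
      rw [hline_eq]
      exact this
    rw [pvSliceAsMap line 0 (max 0 e)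
      (max 0 (e + PySem.List.len k0)) (le_max_left _ _) (le_max_left _ _)]
    rw [hlenk]
    have hrng2 : PySem.List.pyRange (max 0 e)
        (min (max 0 (e + ((k0.length : Nat) : Int))) (line.length : Int)) 1
        = PySem.List.pyRange (max 0 e) (min (e + ((k0.length : Nat) : Int)) W) 1 := by
      apply pvRangeBound
      omega
    refine Eq.symm ?_
    show (PySem.List.pyRange 0 ((k0.length : Nat) : Int) 1).flatMap
        (fun n => if 0 ≤ e + n ∧ e + n < W then [PySem.List.pyGetD line (e + n) 0] else []) = _
    rw [pvClampFlat (fun c => [PySem.List.pyGetD line c 0]) e W k0.length]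
    rw [List.map_eq_flatMap, hrng2]
  rw [hA, hB]
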